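-- pv_equiv track=rewrite | github.com/ADiTyaRaj8969/Matrices | 19. Rotate Matrix k Times.py | rotate_k
-- ===== SOURCE A (Python) =====
-- from collections import deque
--
-- def rotate_k(A,k):
--     flat=[v for r in A for v in r]
--     k%=len(flat)
--     dq=deque(flat)
--     dq.rotate(k)
--     it=iter(dq)
--     n=len(A); m=len(A[0])
--     B=[ [next(it) for _ in range(m)] for _ in range(n) ]
--     return B
-- ===== SOURCE B (Python) =====
-- def rotate_k(A, k):
--     flat = [v for r in A for v in r]
--     L = len(flat)
--     m = len(A[0])
--     return [[flat[(i * m + j - k) % L] for j in range(m)] for i in range(len(A))]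
-- ===== Notes on version B (the rewrite author's own statement) =====
-- stated objective: simpler
-- what changed: B builds no rotated sequence at all: instead of A's deque.rotate followed by sequentially consuming an iterator, each output cell is read directly from the flattened list by the closed-form modular index flat[(i*m+j-k)%L], fusing rotation and reshape into one indexed pass.
import Mathlib
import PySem

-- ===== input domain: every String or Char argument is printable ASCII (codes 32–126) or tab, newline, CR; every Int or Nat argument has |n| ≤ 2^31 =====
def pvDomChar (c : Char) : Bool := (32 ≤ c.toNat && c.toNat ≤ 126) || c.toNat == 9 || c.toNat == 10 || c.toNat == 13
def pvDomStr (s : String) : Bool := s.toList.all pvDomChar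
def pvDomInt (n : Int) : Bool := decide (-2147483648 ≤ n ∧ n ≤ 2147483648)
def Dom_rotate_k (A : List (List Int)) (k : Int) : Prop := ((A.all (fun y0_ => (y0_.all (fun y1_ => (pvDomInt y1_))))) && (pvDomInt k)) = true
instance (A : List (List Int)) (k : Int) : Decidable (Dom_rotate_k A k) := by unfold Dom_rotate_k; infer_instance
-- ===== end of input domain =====

-- B builds no rotated sequence: each output cell is read straight from the flattened
-- list via the closed-form modular index flat[(i*m+j-k)%L], fusing A's deque rotation
-- and iterator-driven reshape into one indexed pass; simpler, same cost.

-- ===== PORT A =====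
-- 'B=[[next(it) for _ in range(m)] for _ in range(n)]': each row consumes the next m
-- elements of the iterator; ported as structural recursion on the row count over the
-- remaining iterator state (take m / drop m). Iterator exhaustion (StopIteration) is
-- excluded by Pre_.
def rotate_k_rows (n m : Nat) (it : List Int) : List (List Int) :=
  match n with
  | 0 => []
  | n + 1 => it.take m :: rotate_k_rows n m (it.drop m)

def rotate_k (A : List (List Int)) (k : Int) : List (List Int) :=
  let flat := A.flatMap id
  -- k %= len(flat): ZeroDivisionError on empty flat is excluded by Pre_
  let k' := PySem.Int.mod k (PySem.List.len flat)
  -- dq.rotate(k') with 0 ≤ k' < len(flat): the last k' elements move to the front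
  -- (exact for deque.rotate on this range of k')
  let dq := flat.drop (flat.length - k'.toNat) ++ flat.take (flat.length - k'.toNat)
  let n := A.length
  let m := (PySem.List.pyGetD A 0 []).length  -- A[0]; IndexError for A = [] excluded by Pre_
  rotate_k_rows n m dq

-- ===== PORT B =====
def rotate_k_alt (A : List (List Int)) (k : Int) : List (List Int) :=
  let flat := A.flatMap id
  let L := PySem.List.len flat
  let m := PySem.List.len (PySem.List.pyGetD A 0 [])
  -- flat[(i*m+j-k)%L]: with L > 0 (Pre_) the modular index is always in range
  (PySem.List.pyRange 0 (PySem.List.len A) 1).map (fun i =>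
    (PySem.List.pyRange 0 m 1).map (fun j =>
      PySem.List.pyGetD flat (PySem.Int.mod (i * m + j - k) L) 0))

-- ===== PRECONDITION & SPEC =====
-- Pre_ excludes exactly the inputs where A raises: an empty flattened matrix
-- (ZeroDivisionError on k %= len(flat); this covers A = []) and ragged matrices whose
-- first-row width makes n*m exceed the number of elements (StopIteration).
def Pre_rotate_k (A : List (List Int)) (k : Int) : Prop :=
  A ≠ [] ∧ A.flatMap id ≠ [] ∧
  A.length * (A.headD []).length ≤ (A.flatMap id).length

instance (A : List (List Int)) (k : Int) : Decidable (Pre_rotate_k A k) := by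
  unfold Pre_rotate_k; infer_instance

def pvWitness_rotate_k : List (List Int) × Int := ([[1, 2], [3, 4]], 3)

def Spec_rotate_k (A : List (List Int)) (k : Int) (out : List (List Int)) : Prop := out = rotate_k_alt A k
instance (A : List (List Int)) (k : Int) (out : List (List Int)) : Decidable (Spec_rotate_k A k out) := by unfold Spec_rotate_k; infer_instance

-- ===== CLAIM (what is proved, stated in full; the proofs are below) =====
def Claim_equal_rotate_k : Prop := ∀ (A : List (List Int)) (k : Int), Dom_rotate_k A k → Pre_rotate_k A k → Spec_rotate_k A k (rotate_k A k)

-- ===== LEMMAS AND PROOFS =====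

-- A's iterator-consuming reshape, written as a map over cell indices of the deque,
-- row by row from offset `off`
lemma rows_eq (m : Nat) (xs : List Int) :
    ∀ (n off : Nat), off + n * m ≤ xs.length →
    rotate_k_rows n m (xs.drop off)
      = (List.range n).map (fun i =>
          (List.range m).map (fun j => xs.getD (off + i * m + j) 0)) := by
  intro n
  induction n with
  | zero => intro off _; simp [rotate_k_rows]
  | succ n ih =>
    intro off hle
    rw [Nat.add_mul, Nat.one_mul] at hle
    rw [List.range_succ_eq_map]
    simp only [rotate_k_rows, List.map_cons, List.map_map]
    congr 1
    · apply List.ext_getElem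
      · simp; omega
      · intro j hj₁ hj₂
        simp only [List.getElem_take, List.getElem_drop, List.getElem_map,
          List.getElem_range]
        rw [List.getD_eq_getElem xs 0 (by simp at hj₁ ⊢; omega)]
        congr 1; omega
    · rw [List.drop_drop, ih (off + m) (by omega)]
      apply List.map_congr_left
      intro i _
      simp only [Function.comp_def]
      apply List.map_congr_left
      intro j _
      congr 1
      simp only [Nat.succ_mul]
      omega

-- one cell: A's physically rotated deque at position p equals B's modular read
lemma cell_eq (flat : List Int) (k : Int) (p : Nat)
    (hne : flat ≠ []) (hp : p < flat.length) :
    (flat.drop (flat.length - (PySem.Int.mod k (flat.length : Int)).toNat) ++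
      flat.take (flat.length - (PySem.Int.mod k (flat.length : Int)).toNat)).getD p 0
    = PySem.List.pyGetD flat (PySem.Int.mod ((p : Int) - k) (flat.length : Int)) 0 := by
  have hLpos : 0 < (flat.length : Int) := by
    have := List.length_pos_iff.mpr hne; exact_mod_cast this
  set L : Int := (flat.length : Int) with hL
  have hr0 : 0 ≤ PySem.Int.mod k L := PySem.Int.mod_nonneg k hLpos
  have hrlt : PySem.Int.mod k L < L := PySem.Int.mod_lt k hLpos
  set r : Nat := (PySem.Int.mod k L).toNat with hrdef
  have hrL : r < flat.length := by omega
  have hkr : k % L = (r : Int) := by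
    rw [← PySem.Int.mod_eq_emod_of_pos hLpos]; omega
  have hrr : (r : Int) % L = (r : Int) :=
    Int.emod_eq_of_lt (by omega) (by omega)
  have hsub : ((p : Int) - k) % L = ((p : Int) - (r : Int)) % L := by
    conv_lhs => rw [Int.sub_emod, hkr, ← hrr]
    rw [← Int.sub_emod]
  have hmod : PySem.Int.mod ((p : Int) - k) L
      = (if p < r then ((p + flat.length - r : Nat) : Int) else ((p - r : Nat) : Int)) := by
    rw [PySem.Int.mod_eq_emod_of_pos hLpos, hsub]
    split_ifs with h
    · rw [← Int.add_emod_right,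
        Int.emod_eq_of_lt (by omega) (by omega)]
      push_cast; omega
    · rw [Int.emod_eq_of_lt (by omega) (by omega)]
      push_cast; omega
  rw [hmod]
  have hdl : (flat.drop (flat.length - r)).length = r := by simp; omega
  by_cases h : p < r
  · rw [if_pos h, PySem.List.pyGetD_natCast]
    rw [List.getD_eq_getElem _ 0 (by simp; omega),
        List.getD_eq_getElem _ 0 (by omega)]
    rw [List.getElem_append_left (by omega)]
    rw [List.getElem_drop]
    congr 1; omega
  · rw [if_neg h, PySem.List.pyGetD_natCast]
    rw [List.getD_eq_getElem _ 0 (by simp; omega),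
        List.getD_eq_getElem _ 0 (by omega)]
    rw [List.getElem_append_right (by omega)]
    simp only [List.getElem_take, hdl]

theorem rotate_k_spec_aux (A : List (List Int)) (k : Int) (hpre : Pre_rotate_k A k) :
    rotate_k A k = rotate_k_alt A k := by
  obtain ⟨hA, hflat, hcnt⟩ := hpre
  unfold rotate_k rotate_k_alt
  simp only []
  set flat := A.flatMap id with hflatdef
  set r := PySem.Int.mod k (PySem.List.len flat) with hr
  have hm : PySem.List.pyGetD A 0 [] = A.headD [] := by
    cases A with
    | nil => simp at hA
    | cons a as => rw [PySem.List.pyGetD_zero_cons]; rfl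
  set m := (A.headD []).length with hmdef
  set dq := flat.drop (flat.length - r.toNat) ++ flat.take (flat.length - r.toNat)
    with hdq
  have hdqlen : dq.length = flat.length := by rw [hdq]; simp
  have hcnt' : 0 + A.length * m ≤ dq.length := by rw [hdqlen]; simpa using hcnt
  have hrows := rows_eq m dq A.length 0 hcnt'
  rw [List.drop_zero] at hrows
  simp only [Nat.zero_add] at hrows
  rw [hm, hrows]
  -- B side: pyRanges to List.range
  simp only [PySem.List.len_eq, PySem.List.pyRange_zero_natCast, List.map_map,
    Function.comp_def]
  apply List.map_congr_left
  intro i hi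
  apply List.map_congr_left
  intro j hj
  rw [List.mem_range] at hi hj
  have hplt : i * m + j < flat.length := by
    calc i * m + j < (i + 1) * m := by rw [Nat.add_mul]; omega
    _ ≤ A.length * m := Nat.mul_le_mul_right m (by omega)
    _ ≤ flat.length := by simpa using hcnt
  have hidx : (i : Int) * ((A.headD []).length : Int) + (j : Int) - k
      = ((i * m + j : Nat) : Int) - k := by rw [hmdef]; push_cast; ring
  rw [hidx]
  exact cell_eq flat k (i * m + j) hflat hplt

-- ===== VERDICT (by name: the statement is the Claim_ definition above) =====
theorem rotate_k_spec : Claim_equal_rotate_k := by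
  intro A k _ hpre
  unfold Spec_rotate_k
  exact rotate_k_spec_aux A k hpre
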